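-- pv_equiv track=rewrite | github.com/br01805/minimum-color-graph | test/unit/test_tags.py | count_tags
-- ===== SOURCE A (Python) =====
-- def count_tags(tags):
--     all_tags = set()
--     for tag in tags:
--         labels = tag['name'].split('.')
--         label_name = ''
--         for label in labels:
--             label_name += label
--             all_tags.add(label_name)
--             label_name += '.'
--     return len(all_tags)
-- ===== SOURCE B (Python) =====
-- def count_tags(tags):
--     edges = {}
--     next_id = 1
--     for tag in tags:
--         node = 0
--         for label in tag['name'].split('.'):
--             child = edges.get((node, label))
--             if child is None:
--                 child = next_id
--                 edges[(node, label)] = child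
--                 next_id += 1
--             node = child
--     return len(edges)
-- ===== Notes on version B (the rewrite author's own statement) =====
-- stated objective: alternative
-- what changed: Replaces A's set of concatenated prefix strings by a trie encoded as an edge dictionary keyed by (parent-node-id, label): each tag's labels are walked down the trie, creating a fresh node id per new edge, and the answer is the number of edges (= distinct prefixes), so no prefix strings are ever concatenated or hashed.
import Mathlib
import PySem

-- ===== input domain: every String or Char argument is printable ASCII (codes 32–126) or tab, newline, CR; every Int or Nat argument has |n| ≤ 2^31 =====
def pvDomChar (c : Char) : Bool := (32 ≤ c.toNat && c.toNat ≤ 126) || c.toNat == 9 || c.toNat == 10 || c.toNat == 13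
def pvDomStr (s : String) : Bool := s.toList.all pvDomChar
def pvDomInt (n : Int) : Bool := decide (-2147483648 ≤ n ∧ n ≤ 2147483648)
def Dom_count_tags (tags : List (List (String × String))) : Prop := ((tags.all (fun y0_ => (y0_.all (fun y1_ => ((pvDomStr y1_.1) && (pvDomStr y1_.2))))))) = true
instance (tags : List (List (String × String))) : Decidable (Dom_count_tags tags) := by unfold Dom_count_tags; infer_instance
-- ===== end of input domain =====

-- B replaces A's set of concatenated prefix strings by a trie stored as an edge dictionary
-- keyed by (parent node id, label) and counts the edges (objective: alternative algorithm).

-- ===== PORT A =====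
-- tag['name'] raises KeyError when "name" is missing; the '.getD ""' default is unreached
-- under Pre_count_tags.  s.split('.') always returns a value (sep nonempty), so '.getD []'
-- is unreached too.

-- body of A's inner loop: label_name += label; all_tags.add(label_name); label_name += '.'
def pvStepA (st : PySem.Set String × String) (label : String) : PySem.Set String × String :=
  let ln := st.2 ++ label
  (PySem.Set.add st.1 ln, ln ++ ".")

-- body of A's outer loop over tags
def pvTagA (all_tags : PySem.Set String) (tag : List (String × String)) : PySem.Set String :=
  let labels := (PySem.Str.split? (((PySem.Dict.mk tag).get? "name").getD "") ".").getD []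
  (labels.foldl pvStepA (all_tags, "")).1

def count_tags (tags : List (List (String × String))) : Int :=
  let all_tags := tags.foldl pvTagA PySem.Set.empty
  (all_tags.length : Int)

-- ===== PORT B =====
-- body of B's inner loop; state q = ((edges, next_id), node)
def pvStepB (q : (PySem.Dict (Int × String) Int × Int) × Int) (label : String) :
    (PySem.Dict (Int × String) Int × Int) × Int :=
  match q.1.1.get? (q.2, label) with
  | some child => (q.1, child)
  | none => ((q.1.1.insert (q.2, label) q.1.2, q.1.2 + 1), q.1.2)

-- body of B's outer loop; st = (edges, next_id); same remarks about '.getD' as in port A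
def pvTagB (st : PySem.Dict (Int × String) Int × Int) (tag : List (String × String)) :
    PySem.Dict (Int × String) Int × Int :=
  let labels := (PySem.Str.split? (((PySem.Dict.mk tag).get? "name").getD "") ".").getD []
  (labels.foldl pvStepB (st, 0)).1

def count_tags_alt (tags : List (List (String × String))) : Int :=
  let st := tags.foldl pvTagB (PySem.Dict.empty, 1)
  (st.1.size : Int)

-- ===== PRECONDITION & SPEC =====
-- Pre_ excludes exactly the inputs where Python A raises KeyError: a tag without a "name" key.
def Pre_count_tags (tags : List (List (String × String))) : Prop :=
  ∀ tag ∈ tags, (((PySem.Dict.mk tag).get? "name").isSome = true)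
instance (tags : List (List (String × String))) : Decidable (Pre_count_tags tags) := by
  unfold Pre_count_tags; infer_instance

def pvWitness_count_tags : (List (List (String × String))) :=
  [[("name", "a.b.c")], [("name", "a.x"), ("k", "v")], [("name", "")]]

def Spec_count_tags (tags : List (List (String × String))) (out : Int) : Prop := out = count_tags_alt tags
instance (tags : List (List (String × String))) (out : Int) : Decidable (Spec_count_tags tags out) := by unfold Spec_count_tags; infer_instance

-- ===== CLAIM (what is proved, stated in full; the proofs are below) =====
def Claim_equal_count_tags : Prop := ∀ (tags : List (List (String × String))), Dom_count_tags tags → Pre_count_tags tags → Spec_count_tags tags (count_tags tags)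

-- ===== LEMMAS AND PROOFS =====

theorem pv_dotfree_go : ∀ (fuel : Nat) (l cur : List Char) (acc : List (List Char)),
    l.length ≤ fuel → ('.' ∉ cur) → (∀ p ∈ acc, '.' ∉ p) →
    ∀ p ∈ PySem.Chars.splitOn.go ['.'] fuel l cur acc, '.' ∉ p := by
  intro fuel
  induction fuel with
  | zero =>
    intro l cur acc hlen hcur hacc p hp
    have hl : l = [] := List.eq_nil_of_length_eq_zero (Nat.le_zero.mp hlen)
    subst hl
    rw [PySem.Chars.splitOn.go.eq_def] at hp
    simp at hp
    rcases hp with h | h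
    · exact hacc _ h
    · subst h; simpa using hcur
  | succ f ih =>
    intro l cur acc hlen hcur hacc p hp
    cases l with
    | nil =>
      rw [PySem.Chars.splitOn.go.eq_def] at hp
      simp at hp
      rcases hp with h | h
      · exact hacc _ h
      · subst h; simpa using hcur
    | cons c rest =>
      rw [PySem.Chars.splitOn.go.eq_def] at hp
      by_cases hc : c = '.'
      · subst hc
        simp [List.isPrefixOf] at hp
        refine ih rest [] (cur.reverse :: acc) (by simpa using hlen) (by simp) ?_ p hp
        intro q hq
        rcases List.mem_cons.mp hq with hq | hq
        · simp_all
        · exact hacc _ hq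
      · have : (['.'].isPrefixOf (c :: rest)) = false := by
          simp [List.isPrefixOf]; exact fun h => absurd h.symm hc
        simp [this] at hp
        refine ih rest (c :: cur) acc (by simpa using hlen) ?_ hacc p hp
        intro hq
        rcases List.mem_cons.mp hq with hq | hq
        · exact hc hq.symm
        · exact hcur hq

theorem pv_dotfree_split (s : String) :
    ∀ lab ∈ (PySem.Str.split? s ".").getD [], '.' ∉ lab.toList := by
  intro lab hlab
  have hmap := PySem.Str.split?_map s "."
  have hdot : (".".toList) = ['.'] := rfl
  rw [hdot] at hmap
  have hch : PySem.Chars.split? s.toList ['.'] = some (PySem.Chars.splitOn s.toList ['.']) := by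
    simp [PySem.Chars.split?]
  rw [hch] at hmap
  cases hsp : PySem.Str.split? s "." with
  | none => rw [hsp] at hmap; simp at hmap
  | some parts =>
    rw [hsp] at hmap
    simp at hmap
    rw [hsp] at hlab
    simp at hlab
    have : lab.toList ∈ PySem.Chars.splitOn s.toList ['.'] := by
      rw [← hmap]; exact List.mem_map_of_mem hlab
    have hgo : PySem.Chars.splitOn s.toList ['.'] =
        PySem.Chars.splitOn.go ['.'] (s.toList.length + 1) s.toList [] [] := rfl
    rw [hgo] at this
    exact pv_dotfree_go (s.toList.length + 1) s.toList [] [] (by omega) (by simp) (by simp) _ this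

def PvDotKey (p : String) : Prop := p = "" ∨ ∃ t, p = t ++ "."

theorem pv_decomp_unique_aux (p1 p2 l1 l2 : List Char) (hlen : p1.length ≤ p2.length)
    (h : p1 ++ l1 = p2 ++ l2) (h1 : '.' ∉ l1)
    (e2 : p2 = [] ∨ ∃ t, p2 = t ++ ['.']) : p1 = p2 := by
  have hpre : p1 <+: p2 :=
    List.prefix_of_prefix_length_le ⟨l1, h⟩ ⟨l2, rfl⟩ hlen
  obtain ⟨m, hm⟩ := hpre
  rcases eq_or_ne m [] with hm0 | hm0
  · simpa [hm0] using hm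
  · exfalso
    have hp2ne : p2 ≠ [] := by
      intro h0; rw [h0] at hm; exact hm0 (List.append_eq_nil_iff.mp (by rw [hm])).2
    rcases e2 with h0 | ⟨t, ht⟩
    · exact hp2ne h0
    · have hlast : p2.getLast? = some '.' := by rw [ht]; exact List.getLast?_concat
      have hlast2 : m.getLast? = some '.' := by
        rw [← hm] at hlast
        rwa [List.getLast?_append_of_ne_nil _ hm0] at hlast
      have hdm : '.' ∈ m := List.mem_of_getLast? hlast2
      have : l1 = m ++ l2 := by
        rw [← hm] at h
        simpa using h
      exact h1 (this ▸ List.mem_append_left _ hdm)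

theorem pv_dot_cancel {a b : String} (h : a ++ "." = b ++ ".") : a = b := by
  have := congrArg String.toList h
  simp [String.toList_append] at this
  exact String.toList_inj.mp this

theorem pv_dot_ne_empty (a : String) : a ++ "." ≠ "" := by
  intro h
  have := congrArg String.toList h
  simp [String.toList_append] at this

theorem pv_left_cancel {a b c : String} (h : a ++ b = a ++ c) : b = c := by
  have := congrArg String.toList h
  simp [String.toList_append] at this
  exact String.toList_inj.mp this

theorem pv_decomp_unique (p1 p2 l1 l2 : String) (h : p1 ++ l1 = p2 ++ l2)
    (h1 : '.' ∉ l1.toList) (h2 : '.' ∉ l2.toList)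
    (e1 : PvDotKey p1) (e2 : PvDotKey p2) : p1 = p2 := by
  have hl := congrArg String.toList h
  simp only [String.toList_append] at hl
  have e1' : p1.toList = [] ∨ ∃ t, p1.toList = t ++ ['.'] := by
    rcases e1 with h0 | ⟨t, ht⟩
    · left; rw [h0]; rfl
    · right; exact ⟨t.toList, by rw [ht]; simp [String.toList_append]⟩
  have e2' : p2.toList = [] ∨ ∃ t, p2.toList = t ++ ['.'] := by
    rcases e2 with h0 | ⟨t, ht⟩
    · left; rw [h0]; rfl
    · right; exact ⟨t.toList, by rw [ht]; simp [String.toList_append]⟩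
  rcases Nat.le_total p1.toList.length p2.toList.length with hle | hle
  · exact String.toList_inj.mp (pv_decomp_unique_aux _ _ _ _ hle hl h1 e2')
  · exact (String.toList_inj.mp (pv_decomp_unique_aux _ _ _ _ hle hl.symm h2 e1')).symm

theorem pv_snd_inj {ν : List (String × Int)} (h : (ν.map Prod.snd).Nodup)
    {p q : String} {v : Int} (hp : (p, v) ∈ ν) (hq : (q, v) ∈ ν) : p = q := by
  induction ν with
  | nil => cases hp
  | cons x xs ih =>
    simp only [List.map_cons, List.nodup_cons] at h
    rcases List.mem_cons.mp hp with hp' | hp' <;> rcases List.mem_cons.mp hq with hq' | hq'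
    · rw [← hp'] at hq'; exact (Prod.mk.injEq _ _ _ _ ▸ hq').1.symm
    · exfalso; exact h.1 (by rw [← hp']; exact List.mem_map.mpr ⟨_, hq', rfl⟩)
    · exfalso; exact h.1 (by rw [← hq']; exact List.mem_map.mpr ⟨_, hp', rfl⟩)
    · exact ih h.2 hp' hq'

theorem pv_fst_inj {ν : List (String × Int)} (h : (ν.map Prod.fst).Nodup)
    {p : String} {v w : Int} (hp : (p, v) ∈ ν) (hq : (p, w) ∈ ν) : v = w := by
  induction ν with
  | nil => cases hp
  | cons x xs ih =>
    simp only [List.map_cons, List.nodup_cons] at h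
    rcases List.mem_cons.mp hp with hp' | hp' <;> rcases List.mem_cons.mp hq with hq' | hq'
    · rw [← hp'] at hq'; exact (Prod.mk.injEq _ _ _ _ ▸ hq').2.symm
    · exfalso; exact h.1 (by rw [← hp']; exact List.mem_map.mpr ⟨_, hq', rfl⟩)
    · exfalso; exact h.1 (by rw [← hq']; exact List.mem_map.mpr ⟨_, hp', rfl⟩)
    · exact ih h.2 hp' hq'

structure PvInv (S : List String) (E : PySem.Dict (Int × String) Int)
    (ν : List (String × Int)) : Prop where
  nodupS : S.Nodup
  keys_eq : ν.map Prod.fst = "" :: S.map (fun s => s ++ ".")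
  vals_eq : ν.map Prod.snd = (List.range ν.length).map (Int.ofNat)
  len_eq : E.items.length = S.length
  closed : ∀ t l : String, '.' ∉ l.toList → (t ++ "." ++ l) ∈ S → t ∈ S
  edges : ∀ (n c : Int) (l : String), E.get? (n, l) = some c ↔
      ∃ p, (p, n) ∈ ν ∧ (p ++ l ++ ".", c) ∈ ν ∧ '.' ∉ l.toList ∧ (p ++ l) ∈ S

theorem PvInv.key_shape {S E ν} (inv : PvInv S E ν) {p : String} {n : Int}
    (h : (p, n) ∈ ν) : PvDotKey p := by
  have : p ∈ ν.map Prod.fst := List.mem_map.mpr ⟨_, h, rfl⟩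
  rw [inv.keys_eq] at this
  rcases List.mem_cons.mp this with h0 | h0
  · exact Or.inl h0
  · obtain ⟨t, -, ht⟩ := List.mem_map.mp h0
    exact Or.inr ⟨t, ht.symm⟩

theorem PvInv.mem_S_of_key {S E ν} (inv : PvInv S E ν) {p : String} {n : Int}
    (h : (p ++ ".", n) ∈ ν) : p ∈ S := by
  have : p ++ "." ∈ ν.map Prod.fst := List.mem_map.mpr ⟨_, h, rfl⟩
  rw [inv.keys_eq] at this
  rcases List.mem_cons.mp this with h0 | h0
  · exact absurd h0 (pv_dot_ne_empty p)
  · obtain ⟨t, ht, he⟩ := List.mem_map.mp h0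
    rwa [← pv_dot_cancel he]

theorem PvInv.key_of_mem_S {S E ν} (inv : PvInv S E ν) {s : String}
    (h : s ∈ S) : ∃ c, (s ++ ".", c) ∈ ν := by
  have : s ++ "." ∈ ν.map Prod.fst := by
    rw [inv.keys_eq]
    exact List.mem_cons.mpr (Or.inr (List.mem_map.mpr ⟨s, h, rfl⟩))
  obtain ⟨pair, hpair, he⟩ := List.mem_map.mp this
  exact ⟨pair.2, by rw [← he, Prod.mk.eta]; exact hpair⟩

theorem PvInv.nodup_keys {S E ν} (inv : PvInv S E ν) : (ν.map Prod.fst).Nodup := by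
  rw [inv.keys_eq]
  refine List.nodup_cons.mpr ⟨?_, ?_⟩
  · intro h
    obtain ⟨t, -, ht⟩ := List.mem_map.mp h
    exact pv_dot_ne_empty t ht
  · exact inv.nodupS.map (fun a b h => pv_dot_cancel h)

theorem PvInv.nodup_vals {S E ν} (inv : PvInv S E ν) : (ν.map Prod.snd).Nodup := by
  rw [inv.vals_eq]
  exact (List.nodup_range).map (fun a b h => Int.ofNat_inj.mp h)

theorem PvInv.val_lt {S E ν} (inv : PvInv S E ν) {p : String} {n : Int}
    (h : (p, n) ∈ ν) : n < (ν.length : Int) := by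
  have : n ∈ ν.map Prod.snd := List.mem_map.mpr ⟨_, h, rfl⟩
  rw [inv.vals_eq] at this
  obtain ⟨k, hk, he⟩ := List.mem_map.mp this
  rw [List.mem_range] at hk
  rw [← he, Int.ofNat_eq_natCast]
  exact_mod_cast hk

theorem PvInv.root {S E ν} (inv : PvInv S E ν) : ("", (0 : Int)) ∈ ν := by
  cases hν : ν with
  | nil => have := inv.keys_eq; rw [hν] at this; simp at this
  | cons x xs =>
    have hk := inv.keys_eq
    have hv := inv.vals_eq
    rw [hν] at hk hv
    simp only [List.map_cons, List.length_cons] at hk hv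
    rw [List.range_succ_eq_map, List.map_cons] at hv
    have hx1 : x.1 = "" := (List.cons.injEq _ _ _ _ ▸ hk).1
    have hx2 : x.2 = (0 : Int) := (List.cons.injEq _ _ _ _ ▸ hv).1
    exact List.mem_cons.mpr (Or.inl (by rw [← hx1, ← hx2]))

theorem pv_extend {S : List String} {E : PySem.Dict (Int × String) Int}
    {ν : List (String × Int)} {acc l : String} {node : Int}
    (inv : PvInv S E ν) (hmem : (acc, node) ∈ ν) (hl : '.' ∉ l.toList)
    (hE : E.get? (node, l) = none) (hsS : acc ++ l ∉ S) :
    PvInv (S ++ [acc ++ l]) (E.insert (node, l) (ν.length : Int))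
      (ν ++ [(acc ++ l ++ ".", (ν.length : Int))]) := by
  have hnotc : E.contains (node, l) = false := by
    rw [PySem.Dict.contains_eq_isSome_get?, hE]; rfl
  constructor
  · simp [List.nodup_append, inv.nodupS]
    exact fun a ha h => hsS (h ▸ ha)
  · simp [List.map_append, inv.keys_eq]
  · simp [List.map_append, inv.vals_eq, List.range_succ]
  · rw [PySem.Dict.items_insert_of_not_contains _ _ hnotc]
    simp [inv.len_eq]
  · intro t l' hl' hmem'
    rcases List.mem_append.mp hmem' with hs | hs
    · exact List.mem_append_left _ (inv.closed t l' hl' hs)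
    · have heq : t ++ "." ++ l' = acc ++ l := by simpa using hs
      rcases inv.key_shape hmem with h0 | ⟨u, hu⟩
      · exfalso
        rw [h0] at heq
        have hdot : '.' ∈ (t ++ "." ++ l').toList := by simp [String.toList_append]
        rw [heq] at hdot
        simp at hdot
        exact hl hdot
      · have hpq : t ++ "." = u ++ "." := by
          rw [hu] at heq
          exact pv_decomp_unique _ _ _ _ heq hl' hl (Or.inr ⟨t, rfl⟩) (Or.inr ⟨u, rfl⟩)
        have htu : t = u := pv_dot_cancel hpq
        have huS : u ∈ S := inv.mem_S_of_key (by rw [← hu]; exact hmem)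
        exact List.mem_append_left _ (htu ▸ huS)
  · intro n c' l'
    by_cases hkey : ((n, l') : Int × String) = (node, l)
    · have hn : n = node := congrArg Prod.fst hkey
      have hll : l' = l := congrArg Prod.snd hkey
      subst hn; subst hll
      rw [PySem.Dict.get?_insert_self]
      constructor
      · intro hsome
        have hc' : c' = (ν.length : Int) := (Option.some.injEq _ _ ▸ hsome).symm
        subst hc'
        exact ⟨acc, List.mem_append_left _ hmem, List.mem_append_right _ (by simp), hl,
          List.mem_append_right _ (by simp)⟩
      · rintro ⟨p, hp, hpc, -, hps⟩
        have hpν : (p, n) ∈ ν := by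
          rcases List.mem_append.mp hp with h' | h'
          · exact h'
          · exfalso
            simp at h'
            have := inv.val_lt hmem
            omega
        have hpacc : p = acc := pv_snd_inj inv.nodup_vals hpν hmem
        subst hpacc
        rcases List.mem_append.mp hpc with h' | h'
        · exact absurd (inv.mem_S_of_key h') hsS
        · simp at h'
          rw [h']
    · rw [PySem.Dict.get?_insert_of_ne _ _ hkey]
      constructor
      · intro h
        obtain ⟨p, hp, hpc, hlp, hps⟩ := (inv.edges n c' l').mp h
        exact ⟨p, List.mem_append_left _ hp, List.mem_append_left _ hpc, hlp,
          List.mem_append_left _ hps⟩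
      · rintro ⟨p, hp, hpc, hlp, hps⟩
        have hpν : (p, n) ∈ ν := by
          rcases List.mem_append.mp hp with h' | h'
          · exact h'
          · exfalso
            simp at h'
            rcases List.mem_append.mp hps with h2 | h2
            · rw [h'.1] at h2
              exact hsS (inv.closed (acc ++ l) l' hlp h2)
            · simp at h2
              rw [h'.1] at h2
              have := congrArg (fun s => s.toList.length) h2
              simp [String.toList_append] at this
        have hpcν : (p ++ l' ++ ".", c') ∈ ν := by
          rcases List.mem_append.mp hpc with h' | h'
          · exact h'
          · exfalso
            simp at h'
            have hpl : p ++ l' = acc ++ l := h'.1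
            have hpa : p = acc :=
              pv_decomp_unique p acc l' l hpl hlp hl (inv.key_shape hpν) (inv.key_shape hmem)
            have hlleq : l' = l := pv_left_cancel (hpa ▸ hpl)
            have hnn : n = node := pv_fst_inj inv.nodup_keys hpν (by rw [hpa]; exact hmem)
            exact hkey (by rw [hnn, hlleq])
        have hpsS : p ++ l' ∈ S := by
          rcases List.mem_append.mp hps with h' | h'
          · exact h'
          · exfalso
            simp at h'
            have hpa : p = acc :=
              pv_decomp_unique p acc l' l h' hlp hl (inv.key_shape hpν) (inv.key_shape hmem)
            have hlleq : l' = l := pv_left_cancel (hpa ▸ h')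
            have hnn : n = node := pv_fst_inj inv.nodup_keys hpν (by rw [hpa]; exact hmem)
            exact hkey (by rw [hnn, hlleq])
        exact (inv.edges n c' l').mpr ⟨p, hpν, hpcν, hlp, hpsS⟩

theorem pv_inner (labels : List String) :
    ∀ (S : List String) (E : PySem.Dict (Int × String) Int) (ν : List (String × Int))
      (acc : String) (node : Int),
      (∀ l ∈ labels, '.' ∉ l.toList) → PvInv S E ν → (acc, node) ∈ ν →
      ∃ ν',
        PvInv (labels.foldl pvStepA (S, acc)).1
              (labels.foldl pvStepB ((E, (ν.length : Int)), node)).1.1 ν' ∧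
        ((labels.foldl pvStepA (S, acc)).2,
         (labels.foldl pvStepB ((E, (ν.length : Int)), node)).2) ∈ ν' ∧
        (labels.foldl pvStepB ((E, (ν.length : Int)), node)).1.2 = (ν'.length : Int) := by
  induction labels with
  | nil =>
    intro S E ν acc node _ inv hmem
    exact ⟨ν, inv, hmem, rfl⟩
  | cons l ls ih =>
    intro S E ν acc node hlab inv hmem
    have hl : '.' ∉ l.toList := hlab l (List.mem_cons_self ..)
    have hls : ∀ x ∈ ls, '.' ∉ x.toList := fun x hx => hlab x (List.mem_cons_of_mem _ hx)
    simp only [List.foldl_cons]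
    cases hE : E.get? (node, l) with
    | some c =>
      obtain ⟨p, hpν, hpc, -, hpS⟩ := (inv.edges node c l).mp hE
      have hpacc : p = acc := pv_snd_inj inv.nodup_vals hpν hmem
      subst hpacc
      have hA : pvStepA (S, p) l = (S, p ++ l ++ ".") := by
        simp [pvStepA, PySem.Set.add, hpS]
      have hB : pvStepB ((E, (ν.length : Int)), node) l = ((E, (ν.length : Int)), c) := by
        simp [pvStepB, hE]
      rw [hA, hB]
      exact ih S E ν (p ++ l ++ ".") c hls inv hpc
    | none =>
      have hsS : acc ++ l ∉ S := by
        intro hs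
        obtain ⟨c0, hc0⟩ := inv.key_of_mem_S hs
        have hsome : E.get? (node, l) = some c0 :=
          (inv.edges node c0 l).mpr ⟨acc, hmem, hc0, hl, hs⟩
        rw [hE] at hsome; cases hsome
      have hA : pvStepA (S, acc) l = (S ++ [acc ++ l], acc ++ l ++ ".") := by
        simp [pvStepA, PySem.Set.add, hsS]
      have hB : pvStepB ((E, (ν.length : Int)), node) l =
          ((E.insert (node, l) (ν.length : Int), (ν.length : Int) + 1), (ν.length : Int)) := by
        simp [pvStepB, hE]
      rw [hA, hB]
      have inv' := pv_extend inv hmem hl hE hsS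
      have hmem' : (acc ++ l ++ ".", (ν.length : Int)) ∈
          ν ++ [(acc ++ l ++ ".", (ν.length : Int))] := List.mem_append_right _ (by simp)
      have hcast : ((ν ++ [(acc ++ l ++ ".", (ν.length : Int))]).length : Int)
          = (ν.length : Int) + 1 := by simp
      rw [show ((ν.length : Int) + 1)
          = ((ν ++ [(acc ++ l ++ ".", (ν.length : Int))]).length : Int) from hcast.symm]
      exact ih (S ++ [acc ++ l]) _ _ (acc ++ l ++ ".") (ν.length : Int) hls inv' hmem'

theorem pv_outer (tags : List (List (String × String))) :
    ∀ (S : List String) (E : PySem.Dict (Int × String) Int) (ν : List (String × Int)),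
      PvInv S E ν →
      ∃ ν', PvInv (tags.foldl pvTagA S) (tags.foldl pvTagB (E, (ν.length : Int))).1 ν' ∧
            (tags.foldl pvTagB (E, (ν.length : Int))).2 = (ν'.length : Int) := by
  induction tags with
  | nil => intro S E ν inv; exact ⟨ν, inv, rfl⟩
  | cons tag rest ih =>
    intro S E ν inv
    simp only [List.foldl_cons]
    obtain ⟨ν'', inv'', hmem'', hnext''⟩ :=
      pv_inner ((PySem.Str.split? (((PySem.Dict.mk tag).get? "name").getD "") ".").getD [])
        S E ν "" 0 (pv_dotfree_split _) inv inv.root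
    have hsplit : pvTagB (E, (ν.length : Int)) tag
        = ((((PySem.Str.split? (((PySem.Dict.mk tag).get? "name").getD "") ".").getD
              []).foldl pvStepB ((E, (ν.length : Int)), 0)).1.1, (ν''.length : Int)) := by
      have h0 : pvTagB (E, (ν.length : Int)) tag
          = (((PySem.Str.split? (((PySem.Dict.mk tag).get? "name").getD "") ".").getD
              []).foldl pvStepB ((E, (ν.length : Int)), 0)).1 := rfl
      rw [h0, ← hnext'']
    rw [hsplit]
    have hAeq : pvTagA S tag
        = (((PySem.Str.split? (((PySem.Dict.mk tag).get? "name").getD "") ".").getD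
            []).foldl pvStepA (S, "")).1 := rfl
    rw [hAeq]
    exact ih _ _ ν'' inv''

theorem pv_init_inv : PvInv [] PySem.Dict.empty [("", (0 : Int))] := by
  constructor
  · simp
  · rfl
  · rfl
  · rfl
  · intro t l _ h; simp at h
  · intro n c l
    simp [PySem.Dict.get?_empty]

-- ===== VERDICT (by name: the statement is the Claim_ definition above) =====
theorem count_tags_spec : Claim_equal_count_tags := by
  intro tags _ _
  unfold Spec_count_tags count_tags count_tags_alt
  obtain ⟨ν', inv, -⟩ := pv_outer tags [] PySem.Dict.empty [("", (0 : Int))] pv_init_inv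
  simpa [PySem.Dict.size] using congrArg Int.ofNat inv.len_eq.symm
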